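-- pv_equiv track=rewrite | github.com/Jahnissi1/PythonTicTacToe | CPSC217W23A3Board.py | win_in_row
-- ===== SOURCE A (Python) =====
-- UP_ONE = 1
--
-- UP_TWO = 2
--
-- def win_in_row(board,row,piece):
--     """The function will take 3 parameter:
--      :board, a two-dimensional list board that holds a representation of the game-state
--      :row to look in that is specific to that board
--      :piece type of one of the players
--      :return True if there are 3 pieces side by side in the indicated row of the indicated piece type. otherwise false
--      """
--     for check in range(len(board[row]) - UP_TWO):
--         a = (board[row][check])
--         b = (board[row][check + UP_ONE])
--         c = (board[row][check + UP_TWO])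
--         cond = (a == piece and b == piece and c == piece)
--         if cond:
--             return True
--     return False
-- ===== SOURCE B (Python) =====
-- def win_in_row(board, row, piece):
--     run = 0
--     for cell in board[row]:
--         if cell == piece:
--             run += 1
--             if run == 3:
--                 return True
--         else:
--             run = 0
--     return False
-- ===== Notes on version B (the rewrite author's own statement) =====
-- stated objective: simpler
-- what changed: Replaces the index-based sliding three-cell window (range over indices with three subscript reads per step) by a single direct iteration over the row's cells that maintains a run-length counter, returning True as soon as the counter reaches 3.
import Mathlib
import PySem

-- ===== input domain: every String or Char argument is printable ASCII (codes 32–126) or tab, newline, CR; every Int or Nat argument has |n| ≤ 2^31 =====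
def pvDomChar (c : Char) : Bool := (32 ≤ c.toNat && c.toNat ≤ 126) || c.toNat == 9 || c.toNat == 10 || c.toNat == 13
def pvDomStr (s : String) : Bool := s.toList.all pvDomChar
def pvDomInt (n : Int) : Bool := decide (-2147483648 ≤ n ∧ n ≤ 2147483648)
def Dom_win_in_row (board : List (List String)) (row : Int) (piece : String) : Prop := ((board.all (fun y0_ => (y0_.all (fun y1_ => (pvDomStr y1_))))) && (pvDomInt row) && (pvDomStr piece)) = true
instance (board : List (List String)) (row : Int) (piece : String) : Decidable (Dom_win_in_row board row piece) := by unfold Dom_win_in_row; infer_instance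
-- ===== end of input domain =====

-- B replaces A's index-based three-cell window check with a direct run-length-counter
-- scan over the row (objective: simpler); the return value is identical wherever A returns.

-- ===== PORT A =====
-- Literal port of A: for check in range(len(board[row]) - 2): read the cells at
-- check, check+1, check+2; return True on a full match, False after the loop.
-- board[row] is PySem.List.pyGet? (none = IndexError, excluded by Pre_); the inner
-- subscripts are always in range (0 ≤ check < len - 2), so pyGetD with a dummy default is exact.
def win_in_row (board : List (List String)) (row : Int) (piece : String) : Bool :=
  match PySem.List.pyGet? board row with
  | none => false  -- Python raises IndexError here; outside Pre_win_in_row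
  | some r =>
    (PySem.List.pyRange 0 ((r.length : Int) - 2) 1).any (fun check =>
      let a := PySem.List.pyGetD r check ""
      let b := PySem.List.pyGetD r (check + 1) ""
      let c := PySem.List.pyGetD r (check + 2) ""
      a == piece && b == piece && c == piece)

-- ===== PORT B =====
-- Literal port of Source B: one pass over the cells with a run counter, early True at run = 3.
def winAltGo (piece : String) : List String → Nat → Bool
  | [], _ => false
  | cell :: rest, run =>
    if cell == piece then
      if run + 1 == 3 then true else winAltGo piece rest (run + 1)
    else winAltGo piece rest 0

def win_in_row_alt (board : List (List String)) (row : Int) (piece : String) : Bool :=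
  match PySem.List.pyGet? board row with
  | none => false  -- board[row] raises in Python; outside Pre_win_in_row
  | some r => winAltGo piece r 0

-- ===== PRECONDITION & SPEC =====
-- A raises IndexError exactly when row is out of range for board (its only raise point).
def Pre_win_in_row (board : List (List String)) (row : Int) (piece : String) : Prop :=
  PySem.Raise.InRange board.length row
instance (board : List (List String)) (row : Int) (piece : String) : Decidable (Pre_win_in_row board row piece) := by unfold Pre_win_in_row; infer_instance

def pvWitness_win_in_row : List (List String) × Int × String :=
  ([["x", "x", "x"], ["o", ".", "o"]], 0, "x")

def Spec_win_in_row (board : List (List String)) (row : Int) (piece : String) (out : Bool) : Prop := out = win_in_row_alt board row piece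
instance (board : List (List String)) (row : Int) (piece : String) (out : Bool) : Decidable (Spec_win_in_row board row piece out) := by unfold Spec_win_in_row; infer_instance

-- ===== CLAIM (what is proved, stated in full; the proofs are below) =====
def Claim_equal_win_in_row : Prop := ∀ (board : List (List String)) (row : Int) (piece : String), Dom_win_in_row board row piece → Pre_win_in_row board row piece → Spec_win_in_row board row piece (win_in_row board row piece)

-- ===== LEMMAS AND PROOFS =====

-- A's loop, re-stated as a structural recursion on the row (proof helper only).
def winWindows (piece : String) : List String → Bool
  | a :: b :: c :: rest =>
      (a == piece && b == piece && c == piece) || winWindows piece (b :: c :: rest)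
  | _ => false

-- The Nat-indexed form of A's loop equals the structural window recursion.
theorem natAny_eq_winWindows (p : String) (r : List String) :
    (List.range (r.length - 2)).any (fun k =>
      r.getD k "" == p && r.getD (k+1) "" == p && r.getD (k+2) "" == p) = winWindows p r := by
  induction r with
  | nil => rfl
  | cons a xs ih =>
    match xs with
    | [] => rfl
    | [b] => rfl
    | b :: c :: rest =>
      have hlen : (a :: b :: c :: rest).length - 2 = ((b :: c :: rest).length - 2) + 1 := by
        simp
      rw [hlen, List.range_succ_eq_map, List.any_cons, List.any_map]
      have hshift : (List.range ((b :: c :: rest).length - 2)).any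
          ((fun k => (a :: b :: c :: rest).getD k "" == p &&
            (a :: b :: c :: rest).getD (k+1) "" == p &&
            (a :: b :: c :: rest).getD (k+2) "" == p) ∘ Nat.succ)
          = winWindows p (b :: c :: rest) := by
        rw [← ih]
        refine List.any_congr rfl (fun k => ?_)
        simp [Function.comp, Nat.succ_eq_add_one]
      rw [hshift]
      rfl

-- A's range-of-Int-indices loop equals the structural window recursion.
theorem anyRange_eq_winWindows (p : String) (r : List String) :
    (PySem.List.pyRange 0 ((r.length : Int) - 2) 1).any (fun check =>
      let a := PySem.List.pyGetD r check ""
      let b := PySem.List.pyGetD r (check + 1) ""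
      let c := PySem.List.pyGetD r (check + 2) ""
      a == p && b == p && c == p) = winWindows p r := by
  rw [PySem.List.pyRange_one, List.any_map]
  have htn : (((r.length : Int) - 2) - 0).toNat = r.length - 2 := by omega
  rw [htn, ← natAny_eq_winWindows p r]
  refine List.any_congr rfl (fun k => ?_)
  simp only [Function.comp_apply, zero_add]
  have h1 : ((k : Int) + 1) = (((k + 1 : Nat)) : Int) := by push_cast; ring
  have h2 : ((k : Int) + 2) = (((k + 2 : Nat)) : Int) := by push_cast; ring
  have e1 : PySem.List.pyGetD r ((k : Int) + 1) "" = r.getD (k + 1) "" := by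
    rw [h1]; exact PySem.List.pyGetD_natCast r (k + 1) ""
  have e2 : PySem.List.pyGetD r ((k : Int) + 2) "" = r.getD (k + 2) "" := by
    rw [h2]; exact PySem.List.pyGetD_natCast r (k + 2) ""
  rw [PySem.List.pyGetD_natCast, e1, e2]

-- Run-counter invariant: with k matching cells already accumulated (k ≤ 2), B's loop
-- returns true iff the next 3-k cells all match, or some window of 3 matches.
theorem winAltGo_char (p : String) (r : List String) (k : Nat) (hk : k ≤ 2) :
    winAltGo p r k =
      ((decide (3 - k ≤ r.length) && (r.take (3 - k)).all (· == p)) || winWindows p r) := by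
  induction r generalizing k with
  | nil =>
    simp [winAltGo, winWindows]
    omega
  | cons a xs ih =>
    have h3k : 3 - k = (2 - k) + 1 := by omega
    by_cases ha : (a == p) = true
    · by_cases hk2 : k = 2
      · subst hk2
        simp [winAltGo, ha]
      · have hne : ¬ (k + 1 = 3) := by omega
        rw [show winAltGo p (a :: xs) k = winAltGo p xs (k + 1) from by
          simp [winAltGo, ha]; omega]
        rw [ih (k + 1) (by omega)]
        have htake : (a :: xs).take (3 - k) = a :: xs.take (2 - k) := by rw [h3k]; rfl
        have hdec : decide (3 - k ≤ (a :: xs).length) = decide (3 - (k + 1) ≤ xs.length) := by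
          rw [decide_eq_decide]; simp; omega
        have hsub : 3 - (k + 1) = 2 - k := by omega
        rw [htake, hdec, hsub]
        simp only [List.all_cons, ha, Bool.true_and]
        match xs with
        | [] => rfl
        | [b] => rfl
        | b :: c :: rest =>
          have hk1 : k = 0 ∨ k = 1 := by omega
          cases hb : (b == p) <;> cases hc : (c == p) <;>
            rcases hk1 with rfl | rfl <;>
            simp [winWindows, ha, hb, hc]
    · have ha' : (a == p) = false := by simpa using ha
      rw [show winAltGo p (a :: xs) k = winAltGo p xs 0 from by simp [winAltGo, ha']]
      rw [ih 0 (by omega)]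
      have htake : (a :: xs).take (3 - k) = a :: xs.take (2 - k) := by rw [h3k]; rfl
      rw [htake]
      simp only [List.all_cons, ha', Bool.false_and, Bool.and_false, Bool.false_or]
      match xs with
      | [] => rfl
      | [b] => rfl
      | [b, c] => simp [winWindows, ha']
      | b :: c :: d :: rest =>
        cases hb : (b == p) <;> cases hc : (c == p) <;> cases hdd : (d == p) <;>
          simp [winWindows, ha', hb, hc, hdd, List.take]

-- B with a fresh counter computes exactly A's window check.
theorem winAltGo_zero (p : String) (r : List String) :
    winAltGo p r 0 = winWindows p r := by
  rw [winAltGo_char p r 0 (by omega)]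
  match r with
  | [] => rfl
  | [a] => rfl
  | [a, b] => rfl
  | a :: b :: c :: rest =>
    cases hA : (a == p) <;> cases hb : (b == p) <;> cases hc : (c == p) <;>
      simp [winWindows, hA, hb, hc, List.take]

-- ===== VERDICT (by name: the statement is the Claim_ definition above) =====
theorem win_in_row_spec : Claim_equal_win_in_row := by
  intro board row piece _ _
  unfold Spec_win_in_row win_in_row win_in_row_alt
  cases h : PySem.List.pyGet? board row with
  | none => rfl
  | some r => simp only [anyRange_eq_winWindows, winAltGo_zero]
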